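-- pv_equiv track=rewrite | github.com/Project-2CS/api | code/mlmodels/sqlinjection_model/sqlinjection_model.py | preprocess_query
-- ===== SOURCE A (Python) =====
-- def preprocess_query(query):
--     if not isinstance(query, str):
--         return [0, 0, 0]
--     # Length
--     length = len(query)
--     # Punctuation
--     punctuation_count = sum(
--         [
--             1
--             for ch in query
--             if ch in ["!", ",", "'", ";", '"', ".", "-", "?", "[", "]", ")", "("]
--         ]
--     )
--     query = "".join(
--         [
--             (
--                 " "
--                 if ch in ["!", ",", "'", ";", '"', ".", "-", "?", "[", "]", ")", "("]
--                 else ch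
--             )
--             for ch in query
--         ]
--     )
--
--     # Keywords
--     keyword_count = sum(
--         [
--             1
--             for word in query.lower().split()
--             if word
--             in [
--                 "select",
--                 "update",
--                 "insert",
--                 "create",
--                 "drop",
--                 "alter",
--                 "rename",
--                 "exec",
--                 "order",
--                 "group",
--                 "sleep",
--                 "count",
--                 "where",
--             ]
--         ]
--     )
--     return [length, punctuation_count, keyword_count]
-- ===== SOURCE B (Python) =====
-- PUNCT = set("!,';\".-?[]()")
-- KEYWORDS = {"select", "update", "insert", "create", "drop", "alter", "rename",
--             "exec", "order", "group", "sleep", "count", "where"}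
--
--
-- def preprocess_query(query):
--     if not isinstance(query, str):
--         return [0, 0, 0]
--     punctuation_count = 0
--     keyword_count = 0
--     word = []
--
--     def flush():
--         nonlocal keyword_count, word
--         if word and "".join(word) in KEYWORDS:
--             keyword_count += 1
--         word = []
--
--     for ch in query:
--         if ch in PUNCT:
--             punctuation_count += 1
--             flush()
--         elif ch.isspace():
--             flush()
--         else:
--             word.append(ch.lower())
--     flush()
--     return [len(query), punctuation_count, keyword_count]
-- ===== Notes on version B (the rewrite author's own statement) =====
-- stated objective: faster
-- what changed: Replaced A's three separate passes (punctuation count, rebuilding the string with punctuation as spaces, then lower+split+keyword count) by a single tokenizing pass over the characters maintaining a lowercased word buffer flushed at punctuation/whitespace boundaries.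
import Mathlib
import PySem

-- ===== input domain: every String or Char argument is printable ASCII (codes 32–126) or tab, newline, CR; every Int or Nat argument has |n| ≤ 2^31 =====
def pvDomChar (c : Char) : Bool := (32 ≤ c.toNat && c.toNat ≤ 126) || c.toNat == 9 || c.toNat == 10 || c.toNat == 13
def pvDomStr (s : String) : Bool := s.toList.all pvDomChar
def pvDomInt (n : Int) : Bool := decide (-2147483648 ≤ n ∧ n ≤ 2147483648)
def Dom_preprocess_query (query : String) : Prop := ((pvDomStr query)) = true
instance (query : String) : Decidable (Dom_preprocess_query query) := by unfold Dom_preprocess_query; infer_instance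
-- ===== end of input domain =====

-- B replaces A's three passes (count punctuation / rebuild string / lower+split+count)
-- by a single tokenizing pass with a word buffer (measured faster by a constant factor).
-- The Python-side `isinstance` guard is unreachable under the String type and is omitted.

-- ===== PORT A =====
def pvPuncts : List Char := ['!', ',', '\'', ';', '"', '.', '-', '?', '[', ']', ')', '(']

def pvKeywords : List (List Char) :=
  [['s','e','l','e','c','t'], ['u','p','d','a','t','e'], ['i','n','s','e','r','t'],
   ['c','r','e','a','t','e'], ['d','r','o','p'], ['a','l','t','e','r'],
   ['r','e','n','a','m','e'], ['e','x','e','c'], ['o','r','d','e','r'],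
   ['g','r','o','u','p'], ['s','l','e','e','p'], ['c','o','u','n','t'],
   ['w','h','e','r','e']]

def preprocess_query (query : String) : List Int :=
  let cs := query.toList
  let length : Int := cs.length
  let punctuation_count : Int :=
    ((cs.filter (fun ch => pvPuncts.contains ch)).map (fun _ => (1 : Int))).sum
  let cs2 := cs.map (fun ch => if pvPuncts.contains ch then ' ' else ch)
  let keyword_count : Int :=
    (((PySem.Chars.split₀ (PySem.Chars.lower cs2)).filter
        (fun w => pvKeywords.contains w)).map (fun _ => (1 : Int))).sum
  [length, punctuation_count, keyword_count]

-- ===== PORT B =====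
-- flush(): count the buffered word if non-empty and a keyword, clear the buffer
def pvFlush (k : Int) (word : List Char) : Int :=
  if !word.isEmpty && pvKeywords.contains word then k + 1 else k

def pvStep (st : Int × Int × List Char) (ch : Char) : Int × Int × List Char :=
  match st with
  | (p, k, word) =>
    if pvPuncts.contains ch then (p + 1, pvFlush k word, [])
    else if PySem.Chars.isspace ch then (p, pvFlush k word, [])
    else (p, k, word ++ [PySem.Chars.lowerChar ch])

def preprocess_query_alt (query : String) : List Int :=
  let cs := query.toList
  match cs.foldl pvStep (0, 0, []) with
  | (p, k, word) => [(cs.length : Int), p, pvFlush k word]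

-- ===== PRECONDITION & SPEC =====
def Spec_preprocess_query (query : String) (out : List Int) : Prop := out = preprocess_query_alt query
instance (query : String) (out : List Int) : Decidable (Spec_preprocess_query query out) := by unfold Spec_preprocess_query; infer_instance

-- ===== CLAIM (what is proved, stated in full; the proofs are below) =====
def Claim_equal_preprocess_query : Prop := ∀ (query : String), Dom_preprocess_query query → Spec_preprocess_query query (preprocess_query query)

-- ===== LEMMAS AND PROOFS =====

-- A's processed char: punctuation becomes a space, everything else is lowercased
def pvG (c : Char) : Char :=
  if pvPuncts.contains c then ' ' else PySem.Chars.lowerChar c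

-- keyword count of a word list, as an Int
def pvKcount (ws : List (List Char)) : Int :=
  ((ws.filter (fun w => pvKeywords.contains w)).length : Int)

theorem pv_sum_ones {α : Type} (l : List α) : ((l.map (fun _ => (1 : Int))).sum) = l.length := by
  induction l with
  | nil => simp
  | cons a t ih => simp; omega

theorem pv_kcount_append (xs ys : List (List Char)) :
    pvKcount (xs ++ ys) = pvKcount xs + pvKcount ys := by
  simp [pvKcount]

theorem pv_upper_iff (c : Char) : ('A' ≤ c ∧ c ≤ 'Z') ↔ (65 ≤ c.toNat ∧ c.toNat ≤ 90) := by
  rw [Char.le_def, Char.le_def]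
  exact ⟨fun h => h, fun h => h⟩

theorem pv_toNat_ofNat (n : Nat) (h : n.isValidChar) : (Char.ofNat n).toNat = n := by
  rw [Char.ofNat, dif_pos h]
  exact Char.toNat_ofNatAux h

theorem pv_isupper_false (c : Char) (h : ¬ (65 ≤ c.toNat ∧ c.toNat ≤ 90)) :
    PySem.Chars.isupper c = false := by
  rw [PySem.Chars.isupper, Bool.eq_false_iff]
  intro ht
  simp only [Bool.and_eq_true, decide_eq_true_eq] at ht
  exact h ((pv_upper_iff c).mp ht)

theorem pv_lowerChar_eq_self (c : Char) (h : ¬ (65 ≤ c.toNat ∧ c.toNat ≤ 90)) :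
    PySem.Chars.lowerChar c = c := by
  simp [PySem.Chars.lowerChar, pv_isupper_false c h]

theorem pv_lowerChar_toNat (c : Char) (h : 65 ≤ c.toNat ∧ c.toNat ≤ 90) :
    (PySem.Chars.lowerChar c).toNat = c.toNat + 32 := by
  have hu : PySem.Chars.isupper c = true := by
    rw [PySem.Chars.isupper]
    simp only [Bool.and_eq_true, decide_eq_true_eq]
    exact (pv_upper_iff c).mpr h
  rw [PySem.Chars.lowerChar, if_pos hu]
  exact pv_toNat_ofNat _ (Or.inl (by omega))

theorem pv_isspace_iff (c : Char) :
    PySem.Chars.isspace c = true ↔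
      (c.toNat = 32 ∨ (9 ≤ c.toNat ∧ c.toNat ≤ 13) ∨ (28 ≤ c.toNat ∧ c.toNat ≤ 31) ∨ c.toNat = 133 ∨
       c.toNat = 160 ∨ c.toNat = 5760 ∨ (8192 ≤ c.toNat ∧ c.toNat ≤ 8202) ∨ c.toNat = 8232 ∨
       c.toNat = 8233 ∨ c.toNat = 8239 ∨ c.toNat = 8287 ∨ c.toNat = 12288) := by
  simp [PySem.Chars.isspace]; tauto

theorem pv_isspace_lowerChar (c : Char) :
    PySem.Chars.isspace (PySem.Chars.lowerChar c) = PySem.Chars.isspace c := by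
  by_cases h : 65 ≤ c.toNat ∧ c.toNat ≤ 90
  · have h1 : PySem.Chars.isspace (PySem.Chars.lowerChar c) = false := by
      rw [Bool.eq_false_iff]; intro hs
      have := (pv_isspace_iff _).mp hs
      rw [pv_lowerChar_toNat c h] at this; omega
    have h2 : PySem.Chars.isspace c = false := by
      rw [Bool.eq_false_iff]; intro hs
      have := (pv_isspace_iff _).mp hs; omega
    rw [h1, h2]
  · rw [pv_lowerChar_eq_self c h]

theorem pv_lowerChar_of_isspace (c : Char) (hs : PySem.Chars.isspace c = true) :
    PySem.Chars.lowerChar c = c := by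
  apply pv_lowerChar_eq_self
  have := (pv_isspace_iff c).mp hs
  omega

theorem pv_isspace_space : PySem.Chars.isspace ' ' = true := by decide

theorem pv_lowerChar_space : PySem.Chars.lowerChar ' ' = ' ' := by decide

-- pull the accumulator out of split₀.go
theorem pv_go_acc (cs cur : List Char) (acc : List (List Char)) :
    PySem.Chars.split₀.go cs cur acc = acc.reverse ++ PySem.Chars.split₀.go cs cur [] := by
  induction cs generalizing cur acc with
  | nil =>
    by_cases h : cur.isEmpty <;> simp [PySem.Chars.split₀.go, h]
  | cons c rest ih =>
    by_cases hs : PySem.Chars.isspace c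
    · by_cases h : cur.isEmpty
      · simp only [PySem.Chars.split₀.go, hs, h, if_true]
        exact ih [] acc
      · simp only [PySem.Chars.split₀.go, hs, h, if_true, if_false, Bool.false_eq_true]
        rw [ih [] (cur.reverse :: acc), ih [] [cur.reverse]]
        simp
    · simp only [PySem.Chars.split₀.go, hs, Bool.false_eq_true, if_false]
      exact ih (c :: cur) acc

-- the punctuation component of B's fold
theorem pv_fold_fst (cs : List Char) (p k : Int) (buf : List Char) :
    (cs.foldl pvStep (p, k, buf)).1
      = p + ((cs.filter (fun c => pvPuncts.contains c)).length : Int) := by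
  induction cs generalizing p k buf with
  | nil => simp
  | cons c rest ih =>
    by_cases hp : c ∈ pvPuncts
    · simp [pvStep, hp, ih]; omega
    · by_cases hs : PySem.Chars.isspace c <;> simp [pvStep, hp, hs, ih]

-- the keyword component of B's fold equals A's split-based count
theorem pv_fold_kw (cs : List Char) (p k : Int) (buf : List Char) :
    pvFlush (cs.foldl pvStep (p, k, buf)).2.1 (cs.foldl pvStep (p, k, buf)).2.2
      = k + pvKcount (PySem.Chars.split₀.go (cs.map pvG) buf.reverse []) := by
  induction cs generalizing p k buf with
  | nil =>
    by_cases h : buf.isEmpty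
    · have hb : buf = [] := by simpa [List.isEmpty_iff] using h
      simp [hb, PySem.Chars.split₀.go, pvFlush, pvKcount]
    · by_cases hk : buf ∈ pvKeywords <;>
        simp [PySem.Chars.split₀.go, h, pvFlush, hk, pvKcount]
  | cons c rest ih =>
    have flush_split : ∀ (k : Int),
        k + pvKcount (PySem.Chars.split₀.go ((' ' : Char) :: rest.map pvG) buf.reverse [])
          = pvFlush k buf + pvKcount (PySem.Chars.split₀.go (rest.map pvG) [] []) := by
      intro k
      by_cases h : buf.isEmpty
      · have hb : buf = [] := by simpa [List.isEmpty_iff] using h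
        simp [hb, PySem.Chars.split₀.go, pv_isspace_space, pvFlush]
      · have hgo : PySem.Chars.split₀.go ((' ' : Char) :: rest.map pvG) buf.reverse []
            = [buf] ++ PySem.Chars.split₀.go (rest.map pvG) [] [] := by
          simp only [PySem.Chars.split₀.go, pv_isspace_space, if_true]
          rw [if_neg (by simpa using h), pv_go_acc (rest.map pvG) [] [buf.reverse.reverse]]
          simp
        rw [hgo, pv_kcount_append]
        by_cases hk : buf ∈ pvKeywords <;>
          simp [pvFlush, h, hk, pvKcount] <;> try omega
    by_cases hp : c ∈ pvPuncts
    · have hg : pvG c = ' ' := by simp [pvG, hp]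
      simp only [List.foldl_cons, List.map_cons, hg]
      rw [show pvStep (p, k, buf) c = (p + 1, pvFlush k buf, []) from by simp [pvStep, hp]]
      rw [ih, List.reverse_nil, flush_split]
    · by_cases hs : PySem.Chars.isspace c
      · have hg : pvG c = c := by simp [pvG, hp, pv_lowerChar_of_isspace c hs]
        simp only [List.foldl_cons, List.map_cons, hg]
        rw [show pvStep (p, k, buf) c = (p, pvFlush k buf, []) from by simp [pvStep, hp, hs]]
        rw [ih, List.reverse_nil]
        have hgo : PySem.Chars.split₀.go (c :: rest.map pvG) buf.reverse []
            = PySem.Chars.split₀.go ((' ' : Char) :: rest.map pvG) buf.reverse [] := by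
          simp only [PySem.Chars.split₀.go, hs, pv_isspace_space, if_true]
        rw [hgo, flush_split]
      · have hg : pvG c = PySem.Chars.lowerChar c := by simp [pvG, hp]
        have hs' : PySem.Chars.isspace (PySem.Chars.lowerChar c) = false := by
          rw [pv_isspace_lowerChar]; simpa using hs
        simp only [List.foldl_cons, List.map_cons, hg]
        rw [show pvStep (p, k, buf) c = (p, k, buf ++ [PySem.Chars.lowerChar c]) from by
          simp [pvStep, hp, hs]]
        rw [ih]
        have hgo : PySem.Chars.split₀.go (PySem.Chars.lowerChar c :: rest.map pvG) buf.reverse []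
            = PySem.Chars.split₀.go (rest.map pvG) (buf ++ [PySem.Chars.lowerChar c]).reverse [] := by
          simp only [PySem.Chars.split₀.go, hs', Bool.false_eq_true, if_false]
          simp
        rw [hgo]

-- A's processed-and-lowered string is cs.map pvG
theorem pv_map_g (cs : List Char) :
    PySem.Chars.lower (cs.map (fun ch => if pvPuncts.contains ch then ' ' else ch)) = cs.map pvG := by
  simp only [PySem.Chars.lower, List.map_map]
  apply List.map_congr_left
  intro c _
  by_cases h : c ∈ pvPuncts
  · simp [pvG, h, pv_lowerChar_space]
  · simp [pvG, h]

-- ===== VERDICT (by name: the statement is the Claim_ definition above) =====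
theorem preprocess_query_spec : Claim_equal_preprocess_query := by
  intro query _
  unfold Spec_preprocess_query preprocess_query preprocess_query_alt
  simp only [pv_sum_ones, pv_map_g]
  have h1 := pv_fold_fst query.toList 0 0 []
  have h2 := pv_fold_kw query.toList 0 0 []
  rcases hf : query.toList.foldl pvStep (0, 0, []) with ⟨p, k, word⟩
  rw [hf] at h1 h2
  simp only [PySem.Chars.split₀]
  simp only [List.reverse_nil] at h2
  simp at h1 h2 ⊢
  exact ⟨h1.symm, by rw [h2]; simp [pvKcount]⟩
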